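-- pv_equiv track=rewrite | github.com/doslindos/ml_crapwrap | data/handlers/spotify/preprocess.py | preprocess_labels
-- ===== SOURCE A (Python) =====
-- def preprocess_labels(sample):
--     for i, s in enumerate(sample):
--         if s < 10:
--             sample[i] = 0
--         elif s < 20:
--             sample[i] = 1
--         elif s < 30:
--             sample[i] = 2
--         elif s < 40:
--             sample[i] = 3
--         elif s < 50:
--             sample[i] = 4
--         elif s < 60:
--             sample[i] = 5
--         elif s < 70:
--             sample[i] = 6
--         elif s < 80:
--             sample[i] = 7
--         elif s < 90:
--             sample[i] = 8
--         else:
--             sample[i] = 9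
--
--     return sample
-- ===== SOURCE B (Python) =====
-- def preprocess_labels(sample):
--     for i, s in enumerate(sample):
--         sample[i] = max(0, min(int(s // 10), 9))
--     return sample
-- ===== Notes on version B (the rewrite author's own statement) =====
-- stated objective: simpler
-- what changed: Replaces the 10-way if/elif comparison cascade with a closed-form decile computation s // 10 clamped between 0 and 9.
import Mathlib
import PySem

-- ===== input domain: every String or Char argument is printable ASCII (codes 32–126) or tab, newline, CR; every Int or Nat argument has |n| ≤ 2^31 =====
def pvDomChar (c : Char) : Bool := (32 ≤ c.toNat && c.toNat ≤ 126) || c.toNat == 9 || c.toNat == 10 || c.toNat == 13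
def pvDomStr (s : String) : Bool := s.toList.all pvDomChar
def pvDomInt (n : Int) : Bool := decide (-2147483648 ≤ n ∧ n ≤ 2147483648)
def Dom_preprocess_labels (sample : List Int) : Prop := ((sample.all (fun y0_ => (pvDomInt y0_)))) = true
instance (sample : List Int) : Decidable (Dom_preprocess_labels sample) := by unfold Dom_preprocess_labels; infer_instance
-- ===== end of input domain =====

-- B replaces A's 10-way if/elif cascade with a closed-form clamped integer division; equivalence of return values proved (A mutates its argument in place; B performs the same mutation in Python).


-- ===== PORT A =====
def preprocess_labels (sample : List Int) : List Int :=
  sample.map (fun s =>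
    if s < 10 then 0
    else if s < 20 then 1
    else if s < 30 then 2
    else if s < 40 then 3
    else if s < 50 then 4
    else if s < 60 then 5
    else if s < 70 then 6
    else if s < 80 then 7
    else if s < 90 then 8
    else 9)

-- ===== PORT B =====
def preprocess_labels_alt (sample : List Int) : List Int :=
  sample.map (fun s => max 0 (min (PySem.Int.floordiv s 10) 9))

-- ===== PRECONDITION & SPEC =====
def Spec_preprocess_labels (sample : List Int) (out : List Int) : Prop := out = preprocess_labels_alt sample
instance (sample : List Int) (out : List Int) : Decidable (Spec_preprocess_labels sample out) := by unfold Spec_preprocess_labels; infer_instance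

-- ===== CLAIM (what is proved, stated in full; the proofs are below) =====
def Claim_equal_preprocess_labels : Prop := ∀ (sample : List Int), Dom_preprocess_labels sample → Spec_preprocess_labels sample (preprocess_labels sample)

-- ===== LEMMAS AND PROOFS =====

-- ===== VERDICT (by name: the statement is the Claim_ definition above) =====
theorem pointwise_eq (s : Int) :
    (if s < 10 then (0:Int)
     else if s < 20 then 1
     else if s < 30 then 2
     else if s < 40 then 3
     else if s < 50 then 4
     else if s < 60 then 5
     else if s < 70 then 6
     else if s < 80 then 7
     else if s < 90 then 8
     else 9) = max 0 (min (PySem.Int.floordiv s 10) 9) := by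
  rw [PySem.Int.floordiv_eq_ediv_of_pos (by omega)]
  split_ifs <;> omega

theorem preprocess_labels_spec : Claim_equal_preprocess_labels := by
  intro sample _
  unfold Spec_preprocess_labels preprocess_labels preprocess_labels_alt
  exact (List.map_congr_left (fun s _ => pointwise_eq s))
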